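-- pv_equiv track=rewrite | github.com/tyler-hoffman/aoc-2015 | advent_of_code_2015_python/day_08/b.py | get_respresentation_count
-- ===== SOURCE A (Python) =====
-- def get_respresentation_count(line: str) -> int:
--     length = len(line)
--     count = 2
--     index = 0
--     while index < length:
--         match line[index]:
--             case '"':
--                 count += 2
--                 index += 1
--             case "\\":
--                 count += 2
--                 index += 1
--             case _:
--                 count += 1
--                 index += 1
--     return count
-- ===== SOURCE B (Python) =====
-- def get_respresentation_count(line: str) -> int:
--     # closed form: 2 quotes around the string, 1 unit per char, +1 for each char needing an escape
--     return len(line) + 2 + line.count('"') + line.count('\\')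
-- ===== Notes on version B (the rewrite author's own statement) =====
-- stated objective: simpler
-- what changed: Replaced the explicit index-driven while loop with per-character match by a single closed-form arithmetic expression: length plus 2 plus the counts of the two escape-needing characters.
import Mathlib
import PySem

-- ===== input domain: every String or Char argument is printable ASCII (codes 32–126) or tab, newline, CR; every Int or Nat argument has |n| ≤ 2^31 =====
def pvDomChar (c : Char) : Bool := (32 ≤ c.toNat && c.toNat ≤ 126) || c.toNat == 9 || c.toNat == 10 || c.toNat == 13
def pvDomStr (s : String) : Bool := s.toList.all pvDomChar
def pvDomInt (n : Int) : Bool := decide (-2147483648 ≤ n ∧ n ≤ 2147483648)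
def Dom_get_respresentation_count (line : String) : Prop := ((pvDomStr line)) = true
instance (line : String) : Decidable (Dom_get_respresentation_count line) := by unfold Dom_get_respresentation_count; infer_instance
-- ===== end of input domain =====

-- B replaces A's per-character while loop by the closed form len+2+count('"')+count('\\'): simpler.

-- ===== PORT A =====
-- the while loop: index advances by one every iteration, so it is a walk over the characters carrying `count`
def pvLoopA : List Char → Int → Int
  | [], count => count
  | c :: rest, count =>
    if c = '"' then pvLoopA rest (count + 2)
    else if c = '\\' then pvLoopA rest (count + 2)
    else pvLoopA rest (count + 1)

def get_respresentation_count (line : String) : Int :=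
  pvLoopA line.toList 2

-- ===== PORT B =====
def get_respresentation_count_alt (line : String) : Int :=
  (PySem.Str.len line : Int) + 2 + (PySem.Str.count line "\"" : Int) + (PySem.Str.count line "\\" : Int)

-- ===== PRECONDITION & SPEC =====
def Spec_get_respresentation_count (line : String) (out : Int) : Prop := out = get_respresentation_count_alt line
instance (line : String) (out : Int) : Decidable (Spec_get_respresentation_count line out) := by unfold Spec_get_respresentation_count; infer_instance

-- ===== CLAIM (what is proved, stated in full; the proofs are below) =====
def Claim_equal_get_respresentation_count : Prop := ∀ (line : String), Dom_get_respresentation_count line → Spec_get_respresentation_count line (get_respresentation_count line)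

-- ===== LEMMAS AND PROOFS =====

theorem pvLoopA_eq (cs : List Char) (k : Int) :
    pvLoopA cs k = k + cs.length + cs.count '"' + cs.count '\\' := by
  induction cs generalizing k with
  | nil => simp [pvLoopA]
  | cons c rest ih =>
    by_cases h1 : c = '"'
    · simp [pvLoopA, h1, ih]; ring
    · by_cases h2 : c = '\\'
      · simp [pvLoopA, h1, h2, ih]; ring
      · simp [pvLoopA, h1, h2, ih, Ne.symm h1, Ne.symm h2]; ring

theorem pvCountGo_single (c : Char) (fuel : Nat) (cs : List Char) (acc : Nat)
    (h : cs.length ≤ fuel) :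
    PySem.Chars.count.go [c] fuel cs acc = acc + cs.count c := by
  induction fuel generalizing cs acc with
  | zero =>
    interval_cases h' : cs.length
    · simp [List.length_eq_zero_iff] at h'
      simp [PySem.Chars.count.go, h']
  | succ n ih =>
    cases cs with
    | nil => simp [PySem.Chars.count.go]
    | cons x t =>
      simp only [List.length_cons] at h
      by_cases hx : x = c
      · have : List.isPrefixOf [c] (x :: t) = true := by simp [List.isPrefixOf, hx]
        simp [PySem.Chars.count.go, hx, ih t (acc + 1) (by omega)]
        omega
      · have : List.isPrefixOf [c] (x :: t) = false := by
          simp [List.isPrefixOf]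
          exact fun h => absurd h.symm hx
        simp [PySem.Chars.count.go, this, ih t acc (by omega), hx]

theorem pvCount_single (cs : List Char) (c : Char) :
    PySem.Chars.count cs [c] = cs.count c := by
  simp [PySem.Chars.count]
  simpa using pvCountGo_single c cs.length cs 0 le_rfl

-- ===== VERDICT (by name: the statement is the Claim_ definition above) =====
theorem get_respresentation_count_spec : Claim_equal_get_respresentation_count := by
  intro line _
  unfold Spec_get_respresentation_count get_respresentation_count get_respresentation_count_alt
  rw [pvLoopA_eq, PySem.Str.count_eq, PySem.Str.count_eq, PySem.Str.len_eq]
  have h1 : ("\"" : String).toList = ['"'] := rfl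
  have h2 : ("\\" : String).toList = ['\\'] := rfl
  rw [h1, h2, pvCount_single, pvCount_single]
  ring
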